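-- pv_equiv track=rewrite | github.com/SaurabhGade/LeetCode | 2640-maximum-number-of-integers-to-choose-from-a-range-i/maximum-number-of-integers-to-choose-from-a-range-i.py | maxCount
-- ===== SOURCE A (Python) =====
-- from typing import List
--
-- def maxCount(banned: List[int], n: int, maxSum: int) -> int:
--     st = set()
--     ans = 0
--     currSum = 0
--     x = 1
--     m = len(banned)
--     for i in range(m):
--         st.add(banned[i])
--     while x <= n and currSum <= maxSum:
--         if x not in st:
--             currSum += x
--             ans +=1
--         x+=1
--     if(currSum > maxSum):
--         ans-= 1
--     return ans
-- ===== SOURCE B (Python) =====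
-- def maxCount(banned, n, maxSum):
--     # Sort the relevant banned values once, describe the allowed numbers as
--     # intervals, and binary-search the largest count c whose minimal possible
--     # sum (sum of the c smallest allowed numbers, by arithmetic series) fits
--     # in maxSum.  lo starts at -1 = "no feasible count".
--     bs = sorted({b for b in banned if 1 <= b <= n})
--     gaps = []
--     prev = 1
--     for b in bs:
--         if b > prev:
--             gaps.append((prev, b - prev))
--         prev = b + 1
--     if prev <= n:
--         gaps.append((prev, n - prev + 1))
--     total = 0
--     for _, cnt in gaps:
--         total += cnt
--
--     def min_sum(c):
--         s = 0
--         for lo, cnt in gaps: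
--             t = min(c, cnt)
--             s += t * lo + t * (t - 1) // 2
--             c -= t
--             if c == 0:
--                 break
--         return s
--
--     lo, hi = -1, total
--     while lo < hi:
--         mid = (lo + hi + 1) // 2
--         if min_sum(mid) <= maxSum:
--             lo = mid
--         else:
--             hi = mid - 1
--     return lo
-- ===== Notes on version B (the rewrite author's own statement) =====
-- stated objective: faster
-- what changed: Replaces A's per-integer scan of 1..n (with a set of banned values) by sorting the relevant banned values, compressing the allowed numbers into intervals, and binary-searching the answer using arithmetic-series sums.
import Mathlib
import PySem

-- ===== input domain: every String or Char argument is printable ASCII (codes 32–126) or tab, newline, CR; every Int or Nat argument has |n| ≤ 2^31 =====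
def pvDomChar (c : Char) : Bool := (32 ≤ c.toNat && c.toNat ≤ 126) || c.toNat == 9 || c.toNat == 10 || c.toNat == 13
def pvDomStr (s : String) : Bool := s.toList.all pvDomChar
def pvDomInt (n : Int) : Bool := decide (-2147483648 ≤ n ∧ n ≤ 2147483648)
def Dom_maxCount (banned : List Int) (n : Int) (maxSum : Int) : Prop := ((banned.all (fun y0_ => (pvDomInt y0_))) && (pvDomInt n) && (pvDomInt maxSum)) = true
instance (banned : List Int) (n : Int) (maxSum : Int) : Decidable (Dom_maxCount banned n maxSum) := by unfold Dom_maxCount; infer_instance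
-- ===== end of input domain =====

-- B replaces A's per-integer scan of 1..n by sorting the banned values, interval
-- compression and a binary search on the answer via arithmetic-series sums.

-- ===== PORT A =====
-- the 'while x <= n and currSum <= maxSum' loop of A; state (x, ans, currSum)
def maxCountLoop (st : PySem.Set Int) (n maxSum : Int) (x ans currSum : Int) : Int × Int :=
  if h : x ≤ n ∧ currSum ≤ maxSum then
    if PySem.Set.contains st x = false then
      maxCountLoop st n maxSum (x + 1) (ans + 1) (currSum + x)
    else
      maxCountLoop st n maxSum (x + 1) ans currSum
  else (ans, currSum)
termination_by (n + 1 - x).toNat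
decreasing_by all_goals omega

def maxCount (banned : List Int) (n : Int) (maxSum : Int) : Int :=
  -- st = set(); for i in range(m): st.add(banned[i])
  let m : Int := PySem.List.len banned
  let st : PySem.Set Int :=
    (PySem.List.pyRange 0 m 1).foldl (fun s i => PySem.Set.add s (PySem.List.pyGetD banned i 0)) PySem.Set.empty
  let p := maxCountLoop st n maxSum 1 0 0
  if maxSum < p.2 then p.1 - 1 else p.1

-- ===== PORT B =====
-- binary-search midpoint bounds (cited by bsearch's decreasing_by)
lemma pvMidBounds (lo hi : Int) (h : lo < hi) :
    lo < PySem.Int.floordiv (lo + hi + 1) 2 ∧ PySem.Int.floordiv (lo + hi + 1) 2 ≤ hi := by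
  constructor
  · rw [show (lo < PySem.Int.floordiv (lo + hi + 1) 2) ↔ (lo + 1 ≤ PySem.Int.floordiv (lo + hi + 1) 2) by omega,
        PySem.Int.le_floordiv_iff_mul_le (by norm_num)]
    omega
  · rw [show (PySem.Int.floordiv (lo + hi + 1) 2 ≤ hi) ↔ (PySem.Int.floordiv (lo + hi + 1) 2 < hi + 1) by omega,
        PySem.Int.floordiv_lt_iff_lt_mul (by norm_num)]
    omega

-- min_sum(c): for lo, cnt in gaps: ... if c == 0: break   (break ported as early return)
def minSumAux (gaps : List (Int × Int)) (c s : Int) : Int :=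
  match gaps with
  | [] => s
  | (lo, cnt) :: rest =>
    let t := min c cnt
    let s' := s + t * lo + PySem.Int.floordiv (t * (t - 1)) 2
    let c' := c - t
    if c' = 0 then s' else minSumAux rest c' s'

-- while lo < hi: mid = (lo+hi+1)//2; ...
def bsearch (gaps : List (Int × Int)) (maxSum lo hi : Int) : Int :=
  if h : lo < hi then
    let mid := PySem.Int.floordiv (lo + hi + 1) 2
    if minSumAux gaps mid 0 ≤ maxSum then bsearch gaps maxSum mid hi
    else bsearch gaps maxSum lo (mid - 1)
  else lo
termination_by (hi - lo).toNat
decreasing_by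
  · have := pvMidBounds lo hi h; omega
  · have := pvMidBounds lo hi h; omega

def maxCount_alt (banned : List Int) (n : Int) (maxSum : Int) : Int :=
  -- bs = sorted({b for b in banned if 1 <= b <= n})
  let bs := PySem.List.sorted (PySem.Set.ofList (banned.filter (fun b => decide (1 ≤ b ∧ b ≤ n)))) (fun x => x) false
  -- gaps = []; prev = 1; for b in bs: ...
  let pg := bs.foldl (fun (pg : Int × List (Int × Int)) b =>
      (b + 1, if pg.1 < b then pg.2 ++ [(pg.1, b - pg.1)] else pg.2)) (1, ([] : List (Int × Int)))
  let gaps := if pg.1 ≤ n then pg.2 ++ [(pg.1, n - pg.1 + 1)] else pg.2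
  -- total = 0; for _, cnt in gaps: total += cnt
  let total := gaps.foldl (fun acc p => acc + p.2) 0
  bsearch gaps maxSum (-1) total

-- ===== PRECONDITION & SPEC =====
def Spec_maxCount (banned : List Int) (n : Int) (maxSum : Int) (out : Int) : Prop := out = maxCount_alt banned n maxSum
instance (banned : List Int) (n : Int) (maxSum : Int) (out : Int) : Decidable (Spec_maxCount banned n maxSum out) := by unfold Spec_maxCount; infer_instance

-- ===== CLAIM (what is proved, stated in full; the proofs are below) =====
def Claim_equal_maxCount : Prop := ∀ (banned : List Int) (n : Int) (maxSum : Int), Dom_maxCount banned n maxSum → Spec_maxCount banned n maxSum (maxCount banned n maxSum)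

-- ===== LEMMAS AND PROOFS =====

-- The allowed numbers of [x..n] in increasing order (mathematical middle layer).
def allowedFrom (banned : List Int) (n : Int) (x : Int) : List Int :=
  if h : x ≤ n then
    (if banned.contains x then allowedFrom banned n (x + 1) else x :: allowedFrom banned n (x + 1))
  else []
termination_by (n + 1 - x).toNat
decreasing_by all_goals omega

-- greedy prefix count: how many leading elements fit in budget B
def pfx : List Int → Int → Int
  | [], _ => 0
  | a :: t, B => if a ≤ B then 1 + pfx t (B - a) else 0

-- [lo, lo+1, ..., lo+cnt-1]
def intRangeN (lo : Int) : Nat → List Int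
  | 0 => []
  | k + 1 => lo :: intRangeN (lo + 1) k

def intRange (lo cnt : Int) : List Int := intRangeN lo cnt.toNat

def flat (gaps : List (Int × Int)) : List Int := gaps.flatMap (fun p => intRange p.1 p.2)

-- recursive specification of B's gap-building loop
def gapsRec (bs : List Int) (n prev : Int) : List (Int × Int) :=
  match bs with
  | [] => if prev ≤ n then [(prev, n - prev + 1)] else []
  | b :: rest => (if prev < b then [(prev, b - prev)] else []) ++ gapsRec rest n (b + 1)

def sumTake (c : Int) (l : List Int) : Int := (l.take c.toNat).sum

-- ----- A side -----

lemma buildSet_eq (banned : List Int) :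
    (PySem.List.pyRange 0 (PySem.List.len banned) 1).foldl
        (fun s i => PySem.Set.add s (PySem.List.pyGetD banned i 0)) PySem.Set.empty
    = PySem.Set.ofList banned := by
  rw [← List.foldl_map (f := fun i => PySem.List.pyGetD banned i 0) (g := fun s b => PySem.Set.add s b)]
  rw [show PySem.List.pyRange 0 (PySem.List.len banned) 1 = PySem.List.pyRange 0 (PySem.List.len banned) from rfl]
  rw [PySem.List.map_pyGetD_pyRange_zero]
  rfl

lemma contains_ofList_eq (banned : List Int) (y : Int) :
    PySem.Set.contains (PySem.Set.ofList banned) y = banned.contains y := by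
  rcases h : banned.contains y
  · simp only [PySem.Set.contains_eq_listContains]
    simp_all [PySem.Set.mem_ofList]
  · simp only [PySem.Set.contains_eq_listContains]
    simp_all [PySem.Set.mem_ofList]

lemma loopA_eq (banned : List Int) (n maxSum : Int) (st : PySem.Set Int)
    (hst : ∀ y, PySem.Set.contains st y = banned.contains y) :
    ∀ (k : Nat) (x ans currSum : Int), (n + 1 - x).toNat = k →
      (if maxSum < (maxCountLoop st n maxSum x ans currSum).2
        then (maxCountLoop st n maxSum x ans currSum).1 - 1
        else (maxCountLoop st n maxSum x ans currSum).1)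
      = ans + (if currSum ≤ maxSum then pfx (allowedFrom banned n x) (maxSum - currSum) else -1) := by
  intro k
  induction k using Nat.strong_induction_on with
  | _ k ih =>
    intro x ans currSum hk
    rw [maxCountLoop]
    by_cases hx : x ≤ n
    · by_cases hc : currSum ≤ maxSum
      · rw [dif_pos ⟨hx, hc⟩, hst x, allowedFrom, dif_pos hx]
        rcases hb : banned.contains x
        · simp only [Bool.false_eq_true, if_true, if_false]
          rw [ih (n + 1 - (x + 1)).toNat (by omega) (x + 1) (ans + 1) (currSum + x) rfl,
              if_pos hc]
          simp only [pfx]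
          by_cases hfit : currSum + x ≤ maxSum
          · rw [if_pos hfit, if_pos (by omega : x ≤ maxSum - currSum)]
            have h2 : maxSum - (currSum + x) = maxSum - currSum - x := by ring
            rw [h2]; ring
          · rw [if_neg hfit, if_neg (by omega : ¬ x ≤ maxSum - currSum)]
            ring
        · simp only [Bool.true_eq_false, if_true, if_false]
          rw [ih (n + 1 - (x + 1)).toNat (by omega) (x + 1) ans currSum rfl]
      · rw [dif_neg (by tauto)]
        simp only
        rw [if_pos (by omega), if_neg hc]
        omega
    · rw [dif_neg (by tauto)]
      simp only
      by_cases hc : currSum ≤ maxSum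
      · rw [if_neg (by omega), if_pos hc, allowedFrom, dif_neg hx]
        simp [pfx]
      · rw [if_pos (by omega), if_neg hc]
        omega

lemma maxCount_eq_target (banned : List Int) (n maxSum : Int) :
    maxCount banned n maxSum
      = (if 0 ≤ maxSum then pfx (allowedFrom banned n 1) maxSum else -1) := by
  unfold maxCount
  simp only [buildSet_eq]
  rw [loopA_eq banned n maxSum _ (contains_ofList_eq banned) (n + 1 - 1).toNat 1 0 0 rfl]
  by_cases h : 0 ≤ maxSum
  · rw [if_pos (by omega : (0:Int) ≤ maxSum), if_pos h]
    norm_num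
  · rw [if_neg (by omega : ¬ (0:Int) ≤ maxSum), if_neg h]
    norm_num

-- ----- B side -----

-- the gap list produced by B's loop (without the final tail gap), and the final prev
def gapsCore : List Int → Int → List (Int × Int)
  | [], _ => []
  | b :: rest, prev => (if prev < b then [(prev, b - prev)] else []) ++ gapsCore rest (b + 1)

def lastPrev : List Int → Int → Int
  | [], prev => prev
  | b :: rest, _ => lastPrev rest (b + 1)

lemma foldl_gaps (bs : List Int) : ∀ (prev : Int) (acc : List (Int × Int)),
    bs.foldl (fun (pg : Int × List (Int × Int)) b =>
        (b + 1, if pg.1 < b then pg.2 ++ [(pg.1, b - pg.1)] else pg.2)) (prev, acc)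
      = (lastPrev bs prev, acc ++ gapsCore bs prev) := by
  induction bs with
  | nil => intro prev acc; simp [lastPrev, gapsCore]
  | cons b rest ih =>
    intro prev acc
    rw [List.foldl_cons, ih]
    simp only [gapsCore, lastPrev]
    by_cases h : prev < b
    · rw [if_pos h, if_pos h, List.append_assoc]
    · rw [if_neg h, if_neg h, List.nil_append]

lemma intRange_zero (lo cnt : Int) (h : cnt ≤ 0) : intRange lo cnt = [] := by
  rw [intRange, Int.toNat_of_nonpos h]; rfl

lemma intRange_cons (lo cnt : Int) (h : 0 < cnt) : intRange lo cnt = lo :: intRange (lo + 1) (cnt - 1) := by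
  have hk : cnt.toNat = (cnt - 1).toNat + 1 := by omega
  rw [intRange, hk, intRangeN, intRange]

lemma length_intRangeN : ∀ (k : Nat) (lo : Int), (intRangeN lo k).length = k := by
  intro k
  induction k with
  | zero => intro lo; rfl
  | succ m ih => intro lo; simp [intRangeN, ih]

lemma length_intRange (lo cnt : Int) : (intRange lo cnt).length = cnt.toNat := by
  rw [intRange, length_intRangeN]

lemma take_intRangeN : ∀ (k : Nat) (lo : Int) (m : Nat), m ≤ k → (intRangeN lo k).take m = intRangeN lo m := by
  intro k
  induction k with
  | zero => intro lo m hm; interval_cases m; rfl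
  | succ j ih =>
    intro lo m hm
    cases m with
    | zero => rfl
    | succ i => simp only [intRangeN, List.take_succ_cons, ih (lo + 1) i (by omega)]

lemma take_intRange (lo cnt c : Int) (h0 : 0 ≤ c) (h1 : c ≤ cnt) :
    (intRange lo cnt).take c.toNat = intRange lo c := by
  rw [intRange, intRange, take_intRangeN cnt.toNat lo c.toNat (by omega)]

-- arithmetic series: t*lo + t*(t-1)//2 is the sum of [lo, ..., lo+t-1]
lemma sum_intRangeN_two : ∀ (k : Nat) (lo : Int),
    2 * (intRangeN lo k).sum = 2 * (k : Int) * lo + (k : Int) * ((k : Int) - 1) := by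
  intro k
  induction k with
  | zero => intro lo; simp [intRangeN]
  | succ m ih =>
    intro lo
    rw [intRangeN, List.sum_cons, show (2 : Int) * (lo + (intRangeN (lo + 1) m).sum)
          = 2 * lo + 2 * (intRangeN (lo + 1) m).sum by ring, ih (lo + 1)]
    push_cast
    ring

lemma series_eq (lo t : Int) (ht : 0 ≤ t) :
    t * lo + PySem.Int.floordiv (t * (t - 1)) 2 = (intRange lo t).sum := by
  have h2 := sum_intRangeN_two t.toNat lo
  rw [show ((t.toNat : Nat) : Int) = t by omega] at h2
  rw [intRange] at *
  have hfd : PySem.Int.floordiv (t * (t - 1)) 2 = (intRangeN lo t.toNat).sum - t * lo := by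
    rw [PySem.Int.floordiv_eq_iff_of_pos (by norm_num)]
    constructor
    · nlinarith
    · nlinarith
  rw [hfd]
  ring

lemma flat_append (g1 g2 : List (Int × Int)) : flat (g1 ++ g2) = flat g1 ++ flat g2 := by
  simp [flat]

lemma minSumAux_eq : ∀ (gaps : List (Int × Int)), (∀ p ∈ gaps, 0 ≤ p.2) →
    ∀ c s : Int, 0 ≤ c → minSumAux gaps c s = s + sumTake c (flat gaps) := by
  intro gaps
  induction gaps with
  | nil => intro _ c s _; simp [minSumAux, flat, sumTake]
  | cons p rest ih =>
    intro hg c s hc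
    obtain ⟨lo, cnt⟩ := p
    have hcnt : 0 ≤ cnt := hg (lo, cnt) (by simp)
    have hflat : flat ((lo, cnt) :: rest) = intRange lo cnt ++ flat rest := by
      simp [flat]
    simp only [minSumAux]
    rw [hflat]
    by_cases hle : c ≤ cnt
    · rw [min_eq_left hle, if_pos (by ring)]
      rw [sumTake, List.take_append,
          show c.toNat - (intRange lo cnt).length = 0 by rw [length_intRange]; omega,
          List.take_zero, List.append_nil, take_intRange lo cnt c hc hle, ← series_eq lo c hc]
      ring
    · push_neg at hle
      rw [min_eq_right (le_of_lt hle), if_neg (by omega), ih (fun p hp => hg p (by simp [hp]))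
            (c - cnt) (s + cnt * lo + PySem.Int.floordiv (cnt * (cnt - 1)) 2) (by omega)]
      rw [sumTake, sumTake, List.take_append,
          show c.toNat - (intRange lo cnt).length = (c - cnt).toNat by rw [length_intRange]; omega,
          List.take_of_length_le (i := c.toNat) (l := intRange lo cnt) (by rw [length_intRange]; omega),
          List.sum_append, ← series_eq lo cnt hcnt]
      ring

-- ----- pfx / sumTake facts -----

lemma pfx_nonneg : ∀ (L : List Int) (B : Int), 0 ≤ pfx L B := by
  intro L
  induction L with
  | nil => intro B; simp [pfx]
  | cons a t ih =>
    intro B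
    rw [pfx]
    split_ifs
    · have := ih (B - a); omega
    · omega

lemma pfx_le_len : ∀ (L : List Int) (B : Int), pfx L B ≤ L.length := by
  intro L
  induction L with
  | nil => intro B; simp [pfx]
  | cons a t ih =>
    intro B
    rw [pfx]
    split_ifs
    · have := ih (B - a); simp; omega
    · simp; omega

lemma sumTake_nonneg (L : List Int) (h : ∀ y ∈ L, 0 ≤ y) (c : Int) : 0 ≤ sumTake c L := by
  apply List.sum_nonneg
  intro y hy
  exact h y (List.mem_of_mem_take hy)

lemma sumTake_pfx_le : ∀ (L : List Int) (B : Int), 0 ≤ B → sumTake (pfx L B) L ≤ B := by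
  intro L
  induction L with
  | nil => intro B hB; simpa [pfx, sumTake] using hB
  | cons a t ih =>
    intro B hB
    rw [pfx]
    by_cases h : a ≤ B
    · rw [if_pos h, sumTake, show (1 + pfx t (B - a)).toNat = (pfx t (B - a)).toNat + 1 by
        have := pfx_nonneg t (B - a); omega]
      rw [List.take_succ_cons, List.sum_cons]
      have h2 : sumTake (pfx t (B - a)) t ≤ B - a := ih (B - a) (by omega)
      rw [sumTake] at h2
      omega
    · rw [if_neg h]
      simpa [sumTake]

lemma sumTake_pfx_succ : ∀ (L : List Int) (B : Int), pfx L B < L.length → B < sumTake (pfx L B + 1) L := by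
  intro L
  induction L with
  | nil => intro B h; simp [pfx] at h
  | cons a t ih =>
    intro B h
    rw [pfx] at *
    by_cases hab : a ≤ B
    · rw [if_pos hab] at *
      rw [sumTake, show (1 + pfx t (B - a) + 1).toNat = (pfx t (B - a) + 1).toNat + 1 by
        have := pfx_nonneg t (B - a); omega, List.take_succ_cons, List.sum_cons]
      have h2 := ih (B - a) (by simp at h; omega)
      rw [sumTake] at h2
      omega
    · rw [if_neg hab] at *
      rw [sumTake, show ((0 : Int) + 1).toNat = 1 by norm_num]
      simp
      omega

lemma sumTake_mono (L : List Int) (h : ∀ y ∈ L, 0 ≤ y) (c c' : Int) (h0 : 0 ≤ c) (hcc : c ≤ c') :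
    sumTake c L ≤ sumTake c' L := by
  have hsub : (L.take c.toNat).Sublist (L.take c'.toNat) :=
    (List.take_prefix_take_left (by omega : c.toNat ≤ c'.toNat)).sublist
  exact List.Sublist.sum_le_sum hsub (fun y hy => h y (List.mem_of_mem_take hy))

-- ----- interval decomposition -----

def gapsAll (bs : List Int) (n prev : Int) : List (Int × Int) :=
  gapsCore bs prev ++ (if lastPrev bs prev ≤ n then [(lastPrev bs prev, n - lastPrev bs prev + 1)] else [])

lemma gapsAll_if (bs : List Int) (n prev : Int) (g : List (Int × Int)) (hg : g = gapsCore bs prev) :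
    (if lastPrev bs prev ≤ n then g ++ [(lastPrev bs prev, n - lastPrev bs prev + 1)] else g)
      = gapsAll bs n prev := by
  rw [gapsAll, hg]
  split_ifs <;> simp

lemma allowed_notin (banned : List Int) (n : Int) :
    ∀ (k : Nat) (prev : Int), (n + 1 - prev).toNat = k →
      (∀ x, prev ≤ x → x ≤ n → banned.contains x = false) →
      allowedFrom banned n prev = intRange prev (n - prev + 1) := by
  intro k
  induction k using Nat.strong_induction_on with
  | _ k ih =>
    intro prev hk hfree
    rw [allowedFrom]
    by_cases hp : prev ≤ n
    · rw [dif_pos hp, hfree prev le_rfl hp, intRange_cons prev (n - prev + 1) (by omega)]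
      simp only [Bool.false_eq_true, if_false]
      rw [show n - prev + 1 - 1 = n - (prev + 1) + 1 by ring,
          ih (n + 1 - (prev + 1)).toNat (by omega) (prev + 1) rfl
            (fun x h1 h2 => hfree x (by omega) h2)]
    · rw [dif_neg hp, intRange_zero prev (n - prev + 1) (by omega)]

lemma allowed_boundary (banned : List Int) (n b : Int) (hbn : b ≤ n) (hb : banned.contains b = true) :
    ∀ (k : Nat) (prev : Int), (b - prev).toNat = k → prev ≤ b →
      (∀ x, prev ≤ x → x < b → banned.contains x = false) →
      allowedFrom banned n prev = intRange prev (b - prev) ++ allowedFrom banned n (b + 1) := by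
  intro k
  induction k using Nat.strong_induction_on with
  | _ k ih =>
    intro prev hk hpb hfree
    by_cases hlt : prev < b
    · rw [allowedFrom, dif_pos (by omega : prev ≤ n), hfree prev le_rfl hlt]
      simp only [Bool.false_eq_true, if_false]
      rw [ih (b - (prev + 1)).toNat (by omega) (prev + 1) rfl (by omega)
            (fun x h1 h2 => hfree x (by omega) h2),
          intRange_cons prev (b - prev) (by omega),
          show b - prev - 1 = b - (prev + 1) by ring]
      simp only [List.cons_append]
    · have hpe : prev = b := by omega
      subst hpe
      rw [allowedFrom, dif_pos (by omega : prev ≤ n), hb,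
          intRange_zero prev (prev - prev) (by omega)]
      simp

lemma allowed_bounds (banned : List Int) (n : Int) :
    ∀ (k : Nat) (prev : Int), (n + 1 - prev).toNat = k →
      ∀ y ∈ allowedFrom banned n prev, prev ≤ y ∧ y ≤ n := by
  intro k
  induction k using Nat.strong_induction_on with
  | _ k ih =>
    intro prev hk y hy
    rw [allowedFrom] at hy
    by_cases hp : prev ≤ n
    · rw [dif_pos hp] at hy
      rcases hb : banned.contains prev
      · rw [hb] at hy
        simp only [Bool.false_eq_true, if_false, List.mem_cons] at hy
        rcases hy with hy | hy
        · omega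
        · have := ih (n + 1 - (prev + 1)).toNat (by omega) (prev + 1) rfl y hy
          omega
      · rw [hb] at hy
        simp only [if_true] at hy
        have := ih (n + 1 - (prev + 1)).toNat (by omega) (prev + 1) rfl y hy
        omega
    · rw [dif_neg hp] at hy
      simp at hy

lemma flat_gapsAll (banned : List Int) (n : Int) :
    ∀ (bs : List Int) (prev : Int), bs.Pairwise (· < ·) →
      (∀ b ∈ bs, prev ≤ b ∧ b ≤ n) →
      (∀ x, prev ≤ x → x ≤ n → (banned.contains x = true ↔ x ∈ bs)) →
      flat (gapsAll bs n prev) = allowedFrom banned n prev := by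
  intro bs
  induction bs with
  | nil =>
    intro prev _ _ hmem
    simp only [gapsAll, gapsCore, lastPrev, List.nil_append]
    have hfree : ∀ x, prev ≤ x → x ≤ n → banned.contains x = false := by
      intro x h1 h2
      rcases hc : banned.contains x
      · rfl
      · exact absurd ((hmem x h1 h2).mp hc) (by simp)
    by_cases hp : prev ≤ n
    · rw [if_pos hp, allowed_notin banned n (n + 1 - prev).toNat prev rfl hfree]
      simp [flat]
    · rw [if_neg hp, allowedFrom, dif_neg hp]
      simp [flat]
  | cons b rest ih =>
    intro prev hpair hbnd hmem
    have hbb : prev ≤ b ∧ b ≤ n := hbnd b (by simp)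
    have hrest_lt : ∀ y ∈ rest, b < y := (List.pairwise_cons.mp hpair).1
    have hcontb : banned.contains b = true := (hmem b hbb.1 hbb.2).mpr (by simp)
    have hfree : ∀ x, prev ≤ x → x < b → banned.contains x = false := by
      intro x h1 h2
      rcases hc : banned.contains x
      · rfl
      · have hx := (hmem x h1 (by omega)).mp hc
        simp only [List.mem_cons] at hx
        rcases hx with hx | hx
        · omega
        · have := hrest_lt x hx; omega
    have hstep : allowedFrom banned n prev
        = intRange prev (b - prev) ++ allowedFrom banned n (b + 1) :=
      allowed_boundary banned n b hbb.2 hcontb (b - prev).toNat prev rfl hbb.1 hfree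
    have hIH : flat (gapsAll rest n (b + 1)) = allowedFrom banned n (b + 1) := by
      apply ih (b + 1) (List.pairwise_cons.mp hpair).2
      · intro y hy
        exact ⟨by have := hrest_lt y hy; omega, (hbnd y (by simp [hy])).2⟩
      · intro x h1 h2
        rw [hmem x (by omega) h2]
        simp only [List.mem_cons]
        constructor
        · rintro (h | h)
          · omega
          · exact h
        · intro h; right; exact h
    have hsplit : gapsAll (b :: rest) n prev
        = (if prev < b then [(prev, b - prev)] else []) ++ gapsAll rest n (b + 1) := by
      simp only [gapsAll, gapsCore, lastPrev, List.append_assoc]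
    rw [hsplit, flat_append, hIH, hstep]
    congr 1
    by_cases h : prev < b
    · rw [if_pos h]; simp [flat]
    · rw [if_neg h, intRange_zero prev (b - prev) (by omega)]
      simp [flat]

-- ----- properties of B's sorted banned list -----

lemma bs_mem (banned : List Int) (n x : Int) :
    x ∈ PySem.List.sorted (PySem.Set.ofList (banned.filter (fun b => decide (1 ≤ b ∧ b ≤ n)))) (fun x => x) false
      ↔ (banned.contains x = true ∧ 1 ≤ x ∧ x ≤ n) := by
  rw [PySem.List.mem_sorted, PySem.Set.mem_ofList, List.mem_filter]
  simp [List.contains_iff_mem]  -- membership of the sorted set-comprehension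

lemma bs_pairwise (banned : List Int) (n : Int) :
    (PySem.List.sorted (PySem.Set.ofList (banned.filter (fun b => decide (1 ≤ b ∧ b ≤ n)))) (fun x => x) false).Pairwise (· < ·) := by
  have hle := PySem.List.sorted_pairwise (xs := PySem.Set.ofList (banned.filter (fun b => decide (1 ≤ b ∧ b ≤ n)))) (key := fun x => x)
  have hnd : (PySem.List.sorted (PySem.Set.ofList (banned.filter (fun b => decide (1 ≤ b ∧ b ≤ n)))) (fun x => x) false).Nodup := by
    have hperm := PySem.List.sorted_perm (xs := PySem.Set.ofList (banned.filter (fun b => decide (1 ≤ b ∧ b ≤ n)))) (key := fun x => x) (rev := false)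
    exact hperm.nodup_iff.mpr (PySem.Set.nodup_ofList _)
  exact (hle.and hnd).imp (fun h => lt_of_le_of_ne h.1 h.2)

-- ----- sizes -----

lemma gapsCore_pos : ∀ (bs : List Int) (prev : Int), ∀ p ∈ gapsCore bs prev, 1 ≤ p.2 := by
  intro bs
  induction bs with
  | nil => intro prev p hp; simp [gapsCore] at hp
  | cons b rest ih =>
    intro prev p hp
    simp only [gapsCore, List.mem_append] at hp
    rcases hp with hp | hp
    · by_cases h : prev < b
      · rw [if_pos h] at hp; simp at hp; subst hp; simp; omega
      · rw [if_neg h] at hp; simp at hp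
    · exact ih (b + 1) p hp

lemma gapsAll_pos (bs : List Int) (n prev : Int) : ∀ p ∈ gapsAll bs n prev, 1 ≤ p.2 := by
  intro p hp
  rw [gapsAll, List.mem_append] at hp
  rcases hp with hp | hp
  · exact gapsCore_pos bs prev p hp
  · split_ifs at hp with h
    · simp at hp; subst hp; simp; omega
    · simp at hp

lemma flat_length_eq : ∀ (gaps : List (Int × Int)), (∀ p ∈ gaps, 0 ≤ p.2) →
    ((flat gaps).length : Int) = gaps.foldl (fun acc p => acc + p.2) 0 := by
  intro gaps hpos
  rw [PySem.List.foldl_add (g := fun p : Int × Int => p.2), zero_add]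
  induction gaps with
  | nil => simp [flat]
  | cons p rest ih =>
    have hp : 0 ≤ p.2 := hpos p (by simp)
    rw [show flat (p :: rest) = intRange p.1 p.2 ++ flat rest by simp [flat],
        List.length_append, List.map_cons, List.sum_cons, length_intRange]
    rw [← ih (fun q hq => hpos q (by simp [hq]))]
    push_cast
    omega

-- ----- binary search -----

lemma bsearch_eq (gaps : List (Int × Int)) (L : List Int) (maxSum total R : Int)
    (hflat : flat gaps = L) (hg : ∀ p ∈ gaps, 0 ≤ p.2)
    (helem : ∀ y ∈ L, 0 ≤ y)
    (htotal : total = (L.length : Int))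
    (hR : R = if 0 ≤ maxSum then pfx L maxSum else -1) :
    ∀ (k : Nat) (lo hi : Int), (hi - lo).toNat = k → -1 ≤ lo → lo ≤ R → R ≤ hi → hi ≤ total →
      bsearch gaps maxSum lo hi = R := by
  intro k
  induction k using Nat.strong_induction_on with
  | _ k ih =>
    intro lo hi hk hlo1 h1 h2 h3
    rw [bsearch]
    by_cases h : lo < hi
    · rw [dif_pos h]
      obtain ⟨hm1, hm2⟩ := pvMidBounds lo hi h
      set mid := PySem.Int.floordiv (lo + hi + 1) 2 with hmid
      have hmid0 : 0 ≤ mid := by omega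
      have hpred : (minSumAux gaps mid 0 ≤ maxSum) ↔ (sumTake mid L ≤ maxSum) := by
        rw [minSumAux_eq gaps hg mid 0 hmid0, hflat, zero_add]
      by_cases hp : minSumAux gaps mid 0 ≤ maxSum
      · rw [if_pos hp]
        have hms : sumTake mid L ≤ maxSum := hpred.mp hp
        have hmR : mid ≤ R := by
          by_contra hcon
          by_cases hms0 : 0 ≤ maxSum
          · rw [hR, if_pos hms0] at hcon h2 h1
            have hlen : pfx L maxSum < (L.length : Int) := by omega
            have hsucc := sumTake_pfx_succ L maxSum (by exact_mod_cast hlen)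
            have hmono := sumTake_mono L helem (pfx L maxSum + 1) mid
              (by have := pfx_nonneg L maxSum; omega) (by omega)
            omega
          · rw [hR, if_neg hms0] at hcon
            have := sumTake_nonneg L helem mid
            omega
        exact ih (hi - mid).toNat (by omega) mid hi rfl (by omega) hmR h2 h3
      · rw [if_neg hp]
        have hRm : R ≤ mid - 1 := by
          by_contra hcon
          have hmidR : mid ≤ R := by omega
          by_cases hms0 : 0 ≤ maxSum
          · rw [hR, if_pos hms0] at hmidR
            have hle := sumTake_pfx_le L maxSum hms0
            have hmono := sumTake_mono L helem mid (pfx L maxSum) hmid0 hmidR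
            exact hp (hpred.mpr (by omega))
          · rw [hR, if_neg hms0] at hmidR
            omega
        exact ih (mid - 1 - lo).toNat (by omega) lo (mid - 1) rfl hlo1 h1 hRm (by omega)
    · rw [dif_neg h]
      omega

-- ----- assembly -----

lemma maxCount_alt_eq_target (banned : List Int) (n maxSum : Int) :
    maxCount_alt banned n maxSum
      = (if 0 ≤ maxSum then pfx (allowedFrom banned n 1) maxSum else -1) := by
  unfold maxCount_alt
  simp only [foldl_gaps, List.nil_append]
  rw [gapsAll_if _ n 1 _ rfl]
  set bs := PySem.List.sorted (PySem.Set.ofList (banned.filter (fun b => decide (1 ≤ b ∧ b ≤ n)))) (fun x => x) false with hbs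
  have hflat : flat (gapsAll bs n 1) = allowedFrom banned n 1 := by
    apply flat_gapsAll banned n bs 1 (bs_pairwise banned n)
    · intro b hb
      have := (bs_mem banned n b).mp hb
      omega
    · intro x h1 h2
      rw [bs_mem banned n x]
      constructor
      · intro hc; exact ⟨hc, h1, h2⟩
      · intro hc; exact hc.1
  have hg := gapsAll_pos bs n 1
  have hg0 : ∀ p ∈ gapsAll bs n 1, 0 ≤ p.2 := fun p hp => by have := hg p hp; omega
  have helem : ∀ y ∈ allowedFrom banned n 1, 0 ≤ y := by
    intro y hy
    have := allowed_bounds banned n (n + 1 - 1).toNat 1 rfl y hy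
    omega
  have htotal : (gapsAll bs n 1).foldl (fun acc p => acc + p.2) 0
      = ((allowedFrom banned n 1).length : Int) := by
    rw [← flat_length_eq (gapsAll bs n 1) hg0, hflat]
  set L := allowedFrom banned n 1 with hL
  set R := if 0 ≤ maxSum then pfx L maxSum else -1 with hR
  have hR1 : -1 ≤ R := by
    rw [hR]; split_ifs
    · have := pfx_nonneg L maxSum; omega
    · omega
  have hR2 : R ≤ (L.length : Int) := by
    rw [hR]; split_ifs
    · exact_mod_cast pfx_le_len L maxSum
    · omega
  rw [htotal]
  exact bsearch_eq (gapsAll bs n 1) L maxSum (L.length : Int) R hflat hg0 helem rfl hR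
    (((L.length : Int)) - (-1)).toNat (-1) (L.length : Int) rfl le_rfl hR1 hR2 le_rfl

theorem maxCount_spec : Claim_equal_maxCount := by
  intro banned n maxSum _
  unfold Spec_maxCount
  rw [maxCount_eq_target, maxCount_alt_eq_target]
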